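-- pv_equiv track=rewrite | github.com/Fondamenti18/fondamenti-di-programmazione | students/1759100/homework02/program02.py | controllo
-- ===== SOURCE A (Python) =====
-- def controllo(lst):
--     index=0
--     while index<len(lst):
--         if lst[index]!='comp' and lst[index]!='sub' and lst[index][0] not in '01234567890':
--             compito=''
--             numerocompito=''
--             for char in lst[index]:
--                 if char not in '0123456789':
--                     compito+=char
--                 else: numerocompito+=char
--             lst[index:index+1]=[compito,numerocompito]
--         index+=1
--     return lst
-- ===== SOURCE B (Python) =====
-- def controllo(lst):
--     def parts(el):
--         if el != 'comp' and el != 'sub' and el[0] not in '0123456789':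
--             return [''.join(c for c in el if c not in '0123456789'),
--                     ''.join(c for c in el if c in '0123456789')]
--         return [el]
--     lst[:] = [p for el in lst for p in parts(el)]
--     return lst
-- ===== Notes on version B (the rewrite author's own statement) =====
-- stated objective: simpler
-- what changed: Replaced A's in-place while loop with index management and slice-splicing into the growing list (re-visiting the spliced-in digits part) by a single pass that maps each element to its one or two parts (letters filter, digits filter) and rebuilds the list with lst[:] = result.
import Mathlib
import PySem

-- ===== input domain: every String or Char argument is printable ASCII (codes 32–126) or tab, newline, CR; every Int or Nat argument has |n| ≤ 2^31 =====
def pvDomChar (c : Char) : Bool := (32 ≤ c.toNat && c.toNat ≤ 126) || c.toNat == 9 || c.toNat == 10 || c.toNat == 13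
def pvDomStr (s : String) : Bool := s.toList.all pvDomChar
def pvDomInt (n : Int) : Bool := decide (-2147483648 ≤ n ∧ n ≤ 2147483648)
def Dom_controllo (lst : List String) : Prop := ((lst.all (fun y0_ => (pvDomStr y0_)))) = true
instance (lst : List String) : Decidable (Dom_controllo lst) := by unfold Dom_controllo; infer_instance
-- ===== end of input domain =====

-- B replaces A's in-place index-managed slice splicing with a single flatMap pass
-- (same return value; both Pythons mutate lst to that value, B via lst[:] = result).

-- ===== PORT A =====
def pvDigits : List Char := "0123456789".toList

-- the for-char loop of A: builds (compito, numerocompito) by appending char by char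
def pvSplitChars (cs : List Char) : List Char × List Char :=
  cs.foldl (fun acc ch =>
    if !(pvDigits.contains ch) then (acc.1 ++ [ch], acc.2) else (acc.1, acc.2 ++ [ch])) ([], [])

-- A's guard; Python raises IndexError on el[0] for el = "" — the port returns false there,
-- such inputs are excluded by Pre_controllo
def pvSplittable (el : String) : Bool :=
  el != "comp" && el != "sub" &&
    (match el.toList with
     | [] => false
     | c :: _ => !("01234567890".toList.contains c))

-- the next three lemmas are needed for termination of controlloLoop (cited in decreasing_by)
lemma pvSplitChars_eq_filter (cs : List Char) :
    pvSplitChars cs = (cs.filter (fun c => !(pvDigits.contains c)),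
                       cs.filter (fun c => pvDigits.contains c)) := by
  unfold pvSplitChars
  suffices h : ∀ a b : List Char,
      cs.foldl (fun acc ch =>
        if !(pvDigits.contains ch) then (acc.1 ++ [ch], acc.2) else (acc.1, acc.2 ++ [ch])) (a, b)
      = (a ++ cs.filter (fun c => !(pvDigits.contains c)),
         b ++ cs.filter (fun c => pvDigits.contains c)) by
    simpa using h [] []
  induction cs with
  | nil => simp
  | cons c cs ih =>
    intro a b
    by_cases h : pvDigits.contains c = true
    · have h' : c ∈ pvDigits := by
        rw [List.contains_eq_mem, decide_eq_true_iff] at h; exact h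
      rw [List.foldl_cons, if_neg (by simp [h']), ih]
      simp [h']
    · have h' : c ∉ pvDigits := by
        rw [List.contains_eq_mem] at h; simpa using h
      rw [List.foldl_cons, if_pos (by simp [h']), ih]
      simp [h']

lemma contains_dup (c : Char) :
    ("01234567890".toList.contains c) = (pvDigits.contains c) := by
  show (['0','1','2','3','4','5','6','7','8','9','0'].contains c)
     = (['0','1','2','3','4','5','6','7','8','9'].contains c)
  by_cases h : c = '0' <;> simp [h]

lemma pvSplittable_snd_false (cs : List Char) :
    pvSplittable (String.ofList (pvSplitChars cs).2) = false := by
  rw [pvSplitChars_eq_filter]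
  unfold pvSplittable
  cases h : cs.filter (fun c => pvDigits.contains c) with
  | nil => simp
  | cons d ds =>
    have hd : d ∈ pvDigits := by
      have hm : d ∈ cs.filter (fun c => pvDigits.contains c) := by
        rw [h]; exact List.mem_cons_self
      simpa using (List.of_mem_filter hm)
    have hd0 : ("01234567890".toList.contains d) = true := by
      rw [contains_dup]; simpa using hd
    simp only [String.toList_ofList, hd0, Bool.not_true, Bool.and_false]

def pvWeight (el : String) : Nat := if pvSplittable el then 2 else 1

-- A's while loop: `done` = lst[:index] (already passed), `rest` = lst[index:]
def controlloLoop (done rest : List String) : List String :=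
  match rest with
  | [] => done
  | el :: rs =>
    if h : pvSplittable el then
      let p := pvSplitChars el.toList
      controlloLoop (done ++ [String.ofList p.1]) (String.ofList p.2 :: rs)
    else
      controlloLoop (done ++ [el]) rs
termination_by (rest.map pvWeight).sum
decreasing_by
  · simp only [List.map_cons, List.sum_cons]
    have h2 : pvWeight el = 2 := by simp [pvWeight, h]
    have h1 : pvWeight (String.ofList (pvSplitChars el.toList).2) = 1 := by
      simp [pvWeight, pvSplittable_snd_false]
    omega
  · simp only [List.map_cons, List.sum_cons]
    have : 1 ≤ pvWeight el := by unfold pvWeight; split <;> omega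
    omega

def controllo (lst : List String) : List String := controlloLoop [] lst

-- ===== PORT B =====
def pvParts (el : String) : List String :=
  if el != "comp" && el != "sub" &&
     (match el.toList with
      | [] => false   -- Python raises IndexError on el[0]; excluded by Pre_controllo
      | c :: _ => !(pvDigits.contains c)) then
    [String.ofList (el.toList.filter (fun c => !(pvDigits.contains c))),
     String.ofList (el.toList.filter (fun c => pvDigits.contains c))]
  else [el]

def controllo_alt (lst : List String) : List String := lst.flatMap pvParts

-- ===== PRECONDITION & SPEC =====
-- Pre_ excludes exactly the inputs on which A raises IndexError: a list is admitted iff every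
-- element is 'comp', 'sub', or contains at least one digit (a non-special element with no digit —
-- including the empty string — makes A evaluate ''[0] and raise).
def Pre_controllo (lst : List String) : Prop :=
  (lst.all (fun el =>
    el == "comp" || el == "sub" || el.toList.any (fun d => pvDigits.contains d))) = true
instance (lst : List String) : Decidable (Pre_controllo lst) := by unfold Pre_controllo; infer_instance
def pvWitness_controllo : List String := ["ab12", "comp", "7x", "sub", " %3"]

def Spec_controllo (lst : List String) (out : List String) : Prop := out = controllo_alt lst
instance (lst : List String) (out : List String) : Decidable (Spec_controllo lst out) := by unfold Spec_controllo; infer_instance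

-- ===== CLAIM (what is proved, stated in full; the proofs are below) =====
def Claim_equal_controllo : Prop := ∀ (lst : List String), Dom_controllo lst → Pre_controllo lst → Spec_controllo lst (controllo lst)

-- ===== LEMMAS AND PROOFS =====
-- B's guard (with '0123456789') computes the same Bool as A's guard (with '01234567890')
lemma pvGuard_eq (el : String) :
    (el != "comp" && el != "sub" &&
      (match el.toList with
       | [] => false
       | c :: _ => !(pvDigits.contains c))) = pvSplittable el := by
  unfold pvSplittable
  cases hc : el.toList with
  | nil => rfl
  | cons c cs =>
    simp only [contains_dup]

lemma pvParts_eq_of_splittable (el : String) (h : pvSplittable el = true) :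
    pvParts el = [String.ofList (pvSplitChars el.toList).1,
                  String.ofList (pvSplitChars el.toList).2] := by
  unfold pvParts
  rw [pvGuard_eq, pvSplitChars_eq_filter]
  simp [h]

lemma pvParts_eq_of_not_splittable (el : String) (h : pvSplittable el = false) :
    pvParts el = [el] := by
  unfold pvParts
  rw [pvGuard_eq]
  simp [h]

lemma controlloLoop_eq (done rest : List String) :
    controlloLoop done rest = done ++ rest.flatMap pvParts := by
  induction done, rest using controlloLoop.induct with
  | case1 done => simp [controlloLoop]
  | case2 done el rs h p ih =>
    rw [controlloLoop]
    simp only [h, dite_true] at ih ⊢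
    rw [ih]
    have hn := pvParts_eq_of_not_splittable (String.ofList (pvSplitChars el.toList).2)
      (pvSplittable_snd_false el.toList)
    simp only [List.flatMap_cons, pvParts_eq_of_splittable el h]
    rw [show pvParts (String.ofList p.2)
          = [String.ofList (pvSplitChars el.toList).2] from hn]
    simp
    rfl
  | case3 done el rs h ih =>
    rw [controlloLoop]
    simp only [h] at ih ⊢
    rw [ih]
    have hf : pvSplittable el = false := by simpa using h
    simp [List.flatMap_cons, pvParts_eq_of_not_splittable el hf]

-- ===== VERDICT (by name: the statement is the Claim_ definition above) =====
theorem controllo_spec : Claim_equal_controllo := by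
  intro lst _ _
  show controllo lst = controllo_alt lst
  unfold controllo controllo_alt
  simpa using controlloLoop_eq [] lst
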